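-- pv_equiv track=rewrite | github.com/Pujithakallu/LeetcodeSolutions | solutions/problem_2065_maximum_path_quality_of_a_graph/solution.py | maximalPathQuality
-- ===== SOURCE A (Python) =====
-- from typing import List
--
-- def maximalPathQuality(values: List[int], edges: List[List[int]], maxTime: int) -> int:
--     # Backtracking - O(2^n) or O(n!) time
--     result = []
--
--     def backtrack(path, start):
--         result.append(path[:])
--         for i in range(start, len(values)):
--             path.append(values[i])
--             backtrack(path, i + 1)
--             path.pop()
--
--     backtrack([], 0)
--     return result
-- ===== SOURCE B (Python) =====
-- from typing import List
--
-- def maximalPathQuality(values: List[int], edges: List[List[int]], maxTime: int) -> int: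
--     # Iterative DFS with an explicit stack instead of recursion.
--     result = []
--     stack = [([], 0)]
--     while stack:
--         path, start = stack.pop()
--         result.append(path)
--         for i in range(len(values) - 1, start - 1, -1):
--             stack.append((path + [values[i]], i + 1))
--     return result
-- ===== Notes on version B (the rewrite author's own statement) =====
-- stated objective: alternative
-- what changed: Replaces A's recursive backtracking (nested function mutating a shared path with append/pop) by an iterative DFS over an explicit stack of (path, start) pairs, pushing children in reverse index order to reproduce the recursion's pre-order.
import Mathlib
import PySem

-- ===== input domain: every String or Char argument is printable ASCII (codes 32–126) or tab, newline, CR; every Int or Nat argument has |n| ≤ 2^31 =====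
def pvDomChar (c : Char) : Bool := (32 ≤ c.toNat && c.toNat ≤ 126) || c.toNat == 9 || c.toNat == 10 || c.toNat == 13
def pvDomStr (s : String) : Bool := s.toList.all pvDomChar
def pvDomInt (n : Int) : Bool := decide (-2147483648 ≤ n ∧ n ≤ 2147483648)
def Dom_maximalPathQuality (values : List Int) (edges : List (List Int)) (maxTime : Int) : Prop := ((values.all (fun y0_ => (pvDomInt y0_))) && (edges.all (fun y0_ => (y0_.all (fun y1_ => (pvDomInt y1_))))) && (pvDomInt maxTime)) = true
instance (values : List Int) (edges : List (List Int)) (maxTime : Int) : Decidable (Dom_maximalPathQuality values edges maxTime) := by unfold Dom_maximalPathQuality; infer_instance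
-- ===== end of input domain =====

-- B replaces A's recursive backtracking by an iterative DFS over an explicit stack of
-- (path, start) pairs, reproducing the recursion's pre-order exactly (objective: alternative).

-- ===== PORT A =====
-- A's `backtrack(path, start)` first records `path`, then for i in range(start, len(values))
-- recurses on (path + [values[i]], i+1).  `btForA values path i` is the `for` loop of that
-- call (the recursive call `backtrack(path', i+1)` is inlined as `path' :: btForA … path' (i+1)`,
-- i.e. record-then-loop, exactly the body of the Python function).
def btForA (values : List Int) (path : List Int) (i : Nat) : List (List Int) :=
  if i < values.length then
    ((path ++ [values[i]!]) :: btForA values (path ++ [values[i]!]) (i + 1))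
      ++ btForA values path (i + 1)
  else []
termination_by values.length - i

def maximalPathQuality (values : List Int) (edges : List (List Int)) (maxTime : Int) : List (List Int) :=
  -- backtrack([], 0): record [] then run the loop
  [] :: btForA values [] 0

-- ===== PORT B =====
-- weight of one stack entry / of the stack, used only as the termination measure of the loop
def pvWtB (n : Nat) (e : List Int × Nat) : Nat := 2 ^ (n - e.2)
def pvMuB (n : Nat) (st : List (List Int × Nat)) : Nat := (st.map (pvWtB n)).sum

theorem pvSumPow (n : Nat) : ∀ s, ((List.range' s (n - s)).map (fun i => (2:Nat) ^ (n - (i + 1)))).sum = 2 ^ (n - s) - 1 := by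
  intro s
  by_cases h : s < n
  · obtain ⟨k, hk⟩ : ∃ k, n - s = k + 1 := ⟨n - s - 1, by omega⟩
    rw [hk, List.range'_succ, List.map_cons, List.sum_cons]
    have h2 : n - (s + 1) = k := by omega
    have := pvSumPow n (s + 1)
    rw [h2] at this
    rw [this, h2]
    have hpos : (1:Nat) ≤ 2 ^ k := Nat.one_le_two_pow
    rw [pow_succ]
    omega
  · have : n - s = 0 := by omega
    simp [this]
termination_by s => n - s
decreasing_by omega

-- the stack loop of Source B: pop (path, start), record path, push the children for
-- i = len-1 … start (so that the child with the smallest i is on top); the stack is the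
-- list with its head on top, hence the children appear in increasing i before `rest`.
def loopB (values : List Int) (stack : List (List Int × Nat)) (result : List (List Int)) : List (List Int) :=
  match stack with
  | [] => result
  | (path, start) :: rest =>
      loopB values
        (((List.range' start (values.length - start)).map
            (fun i => (path ++ [values[i]!], i + 1))) ++ rest)
        (result ++ [path])
termination_by pvMuB values.length stack
decreasing_by
  simp only [pvMuB, List.map_append, List.sum_append, List.map_cons, List.sum_cons, List.map_map]
  have h := pvSumPow values.length start
  have h1 : (((List.range' start (values.length - start)).map
      (fun i => pvWtB values.length (path ++ [values[i]!], i + 1)))).sum = 2 ^ (values.length - start) - 1 := by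
    simpa [pvWtB] using h
  have h2 : (((List.range' start (values.length - start)).map
      ((pvWtB values.length) ∘ fun i => (path ++ [values[i]!], i + 1)))).sum = 2 ^ (values.length - start) - 1 := by
    simpa [Function.comp] using h1
  rw [h2]
  simp [pvWtB]

def maximalPathQuality_alt (values : List Int) (edges : List (List Int)) (maxTime : Int) : List (List Int) :=
  loopB values [([], 0)] []

-- ===== PRECONDITION & SPEC =====
def Spec_maximalPathQuality (values : List Int) (edges : List (List Int)) (maxTime : Int) (out : List (List Int)) : Prop := out = maximalPathQuality_alt values edges maxTime
instance (values : List Int) (edges : List (List Int)) (maxTime : Int) (out : List (List Int)) : Decidable (Spec_maximalPathQuality values edges maxTime out) := by unfold Spec_maximalPathQuality; infer_instance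

-- ===== CLAIM (what is proved, stated in full; the proofs are below) =====
def Claim_equal_maximalPathQuality : Prop := ∀ (values : List Int) (edges : List (List Int)) (maxTime : Int), Dom_maximalPathQuality values edges maxTime → Spec_maximalPathQuality values edges maxTime (maximalPathQuality values edges maxTime)

-- ===== LEMMAS AND PROOFS =====

-- A's whole call backtrack(path, start): record path, then the loop
def btA (values : List Int) (path : List Int) (start : Nat) : List (List Int) :=
  path :: btForA values path start

-- A's loop = the concatenation of the child calls it makes
theorem btForA_eq (values : List Int) : ∀ path s, btForA values path s =
    ((List.range' s (values.length - s)).map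
      (fun i => btA values (path ++ [values[i]!]) (i + 1))).flatten := by
  intro path s
  by_cases h : s < values.length
  · obtain ⟨k, hk⟩ : ∃ k, values.length - s = k + 1 := ⟨values.length - s - 1, by omega⟩
    rw [btForA.eq_def, if_pos h, hk, List.range'_succ, List.map_cons, List.flatten_cons]
    have h2 : values.length - (s + 1) = k := by omega
    have ih := btForA_eq values (path ++ [values[s]!]) (s + 1)
    have ih2 := btForA_eq values path (s + 1)
    rw [h2] at ih2
    rw [btA]
    rw [ih2]
  · have h0 : values.length - s = 0 := by omega
    rw [btForA.eq_def, if_neg h, h0]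
    simp
termination_by _ s => values.length - s
decreasing_by all_goals omega

-- the stack loop computes, in order, the recursive traversal of every stack entry
theorem loopB_eq (values : List Int) : ∀ stack result, loopB values stack result =
    result ++ (stack.map (fun e => btA values e.1 e.2)).flatten := by
  intro stack result
  match stack with
  | [] => rw [loopB]; simp
  | (path, start) :: rest =>
    rw [loopB]
    have ih := loopB_eq values
      (((List.range' start (values.length - start)).map
          (fun i => (path ++ [values[i]!], i + 1))) ++ rest)
      (result ++ [path])
    rw [ih, List.map_append, List.flatten_append, List.map_map, List.map_cons,
        List.flatten_cons]
    have hbt : btA values path start = path ::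
        ((List.range' start (values.length - start)).map
          (fun i => btA values (path ++ [values[i]!]) (i + 1))).flatten := by
      rw [btA, btForA_eq]
    rw [hbt]
    simp only [Function.comp_def, List.cons_append, List.append_assoc, List.nil_append]
termination_by stack _ => pvMuB values.length stack
decreasing_by
  simp only [pvMuB, List.map_append, List.sum_append, List.map_cons, List.sum_cons, List.map_map]
  have h := pvSumPow values.length start
  have h2 : (((List.range' start (values.length - start)).map
      ((pvWtB values.length) ∘ fun i => (path ++ [values[i]!], i + 1)))).sum = 2 ^ (values.length - start) - 1 := by
    simpa [Function.comp, pvWtB] using h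
  rw [h2]
  simp [pvWtB]

-- ===== VERDICT (by name: the statement is the Claim_ definition above) =====
theorem maximalPathQuality_spec : Claim_equal_maximalPathQuality := by
  intro values edges maxTime _
  unfold Spec_maximalPathQuality maximalPathQuality maximalPathQuality_alt
  rw [loopB_eq]
  simp [btA]
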